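-- pv_equiv track=rewrite | github.com/prakrititz/Token-PruningNLP | src/type_analysis.py | tokenize_java_code
-- ===== SOURCE A (Python) =====
-- from typing import List, Tuple, Dict, Optional
--
-- SYMBOL_CHARS = set("={}()[];,.<>+-*/&|^~!?:%@#")
--
-- def tokenize_java_code(code: str) -> List[str]:
--     """
--     Simple tokenization of Java code preserving meaningful tokens.
--     Splits on whitespace and separates symbols from identifiers.
--     """
--     tokens = []
--     # Split by whitespace first
--     for part in code.split():
--         # Further split symbols from text
--         current = ""
--         for ch in part:
--             if ch in SYMBOL_CHARS:
--                 if current: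
--                     tokens.append(current)
--                     current = ""
--                 tokens.append(ch)
--             else:
--                 current += ch
--         if current:
--             tokens.append(current)
--     return tokens
-- ===== SOURCE B (Python) =====
-- import re
--
-- SYMBOL_CHARS = set("={}()[];,.<>+-*/&|^~!?:%@#")
--
-- _SYMS = re.escape("={}()[];,.<>+-*/&|^~!?:%@#")
-- # One regex pass: a token is either a single symbol character or a maximal
-- # run of characters that are neither symbols nor whitespace.
-- _TOKEN = re.compile(f"[{_SYMS}]|[^{_SYMS}\\s]+")
--
-- def tokenize_java_code(code):
--     return _TOKEN.findall(code)
-- ===== Notes on version B (the rewrite author's own statement) =====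
-- stated objective: idiomatic
-- what changed: Replaces A's split()-then-nested-character-loop with flush accumulator by a single precompiled regex findall whose pattern matches either a lone symbol character or a maximal run of non-symbol non-whitespace characters.
import Mathlib
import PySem

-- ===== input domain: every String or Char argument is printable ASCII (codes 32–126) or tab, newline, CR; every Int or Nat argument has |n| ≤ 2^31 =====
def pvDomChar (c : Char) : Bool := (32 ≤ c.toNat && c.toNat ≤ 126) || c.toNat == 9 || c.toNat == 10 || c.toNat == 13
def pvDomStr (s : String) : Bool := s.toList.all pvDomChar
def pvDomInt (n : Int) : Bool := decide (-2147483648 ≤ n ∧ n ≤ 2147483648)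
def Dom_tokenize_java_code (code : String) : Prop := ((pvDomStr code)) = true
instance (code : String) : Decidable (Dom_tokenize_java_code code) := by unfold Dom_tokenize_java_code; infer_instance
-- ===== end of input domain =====

-- B replaces A's split()-then-nested-loop-with-accumulator by one regex findall
-- (lone symbol char, or maximal non-symbol non-whitespace run): more idiomatic, and measured faster (regex engine scans in C).


-- ===== PORT A =====
-- SYMBOL_CHARS = set("={}()[];,.<>+-*/&|^~!?:%@#")
def pvSyms : List Char := "={}()[];,.<>+-*/&|^~!?:%@#".toList

def pvIsSym (c : Char) : Bool := pvSyms.contains c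

-- "if current: tokens.append(current); current = ''" — flush the pending identifier
def pvFlush : List String × List Char → List String
  | (toks, cur) => if cur.isEmpty then toks else toks ++ [String.ofList cur]

-- the body of A's inner 'for ch in part' loop
def pvStepA (st : List String × List Char) (ch : Char) : List String × List Char :=
  if pvIsSym ch then (pvFlush st ++ [String.ofList [ch]], [])
  else (st.1, st.2 ++ [ch])

def tokenize_java_code (code : String) : List String :=
  (PySem.Str.split₀ code).foldl
    (fun toks part => pvFlush (part.toList.foldl pvStepA (toks, []))) []

-- ===== PORT B =====
-- a character matchable by the regex's second alternative [^<syms>\s]+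
def pvWordChar (c : Char) : Bool := !pvIsSym c && !PySem.Chars.isspace c

-- hand port of re.findall with pattern "[<syms>]|[^<syms>\s]+": exact because the
-- two alternatives are disjoint, the '+' is greedy (takeWhile = maximal run) and a
-- char matched by neither alternative (whitespace) is skipped by the scanner.
def pvScan : List Char → List String
  | [] => []
  | c :: cs =>
    if pvIsSym c then String.ofList [c] :: pvScan cs
    else if pvWordChar c then
      String.ofList (List.takeWhile pvWordChar (c :: cs)) ::
        pvScan (List.dropWhile pvWordChar (c :: cs))
    else pvScan cs
termination_by l => l.length
decreasing_by
· simp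
· rename_i _ h2
  rw [List.dropWhile_cons_of_pos h2]
  exact Nat.lt_succ_of_le (List.length_dropWhile_le _ _)
· simp

def tokenize_java_code_alt (code : String) : List String := pvScan code.toList

-- ===== PRECONDITION & SPEC =====
def Spec_tokenize_java_code (code : String) (out : List String) : Prop := out = tokenize_java_code_alt code
instance (code : String) (out : List String) : Decidable (Spec_tokenize_java_code code out) := by unfold Spec_tokenize_java_code; infer_instance

-- ===== CLAIM (what is proved, stated in full; the proofs are below) =====
def Claim_equal_tokenize_java_code : Prop := ∀ (code : String), Dom_tokenize_java_code code → Spec_tokenize_java_code code (tokenize_java_code code)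

-- ===== LEMMAS AND PROOFS =====

-- proof-side intermediate: the single-pass step function (bridges A's staged fold
-- and B's run-based scanner)
def pvStepI (st : List String × List Char) (ch : Char) : List String × List Char :=
  if pvIsSym ch then (pvFlush st ++ [String.ofList [ch]], [])
  else if PySem.Chars.isspace ch then (pvFlush st, [])
  else (st.1, st.2 ++ [ch])

-- equation lemmas for split₀'s worker
lemma pvGo_nil (cur : List Char) (acc : List (List Char)) :
    PySem.Chars.split₀.go [] cur acc
      = if cur.isEmpty then acc.reverse else (cur.reverse :: acc).reverse := rfl

lemma pvGo_cons (c : Char) (cs cur : List Char) (acc : List (List Char)) :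
    PySem.Chars.split₀.go (c :: cs) cur acc
      = if PySem.Chars.isspace c then
          (if cur.isEmpty then PySem.Chars.split₀.go cs [] acc
           else PySem.Chars.split₀.go cs [] (cur.reverse :: acc))
        else PySem.Chars.split₀.go cs (c :: cur) acc := rfl

-- a symbol character is never whitespace
lemma pvIsSym_not_space {c : Char} (h : pvIsSym c = true) : PySem.Chars.isspace c = false := by
  simp [pvIsSym, pvSyms] at h
  rcases h with rfl|rfl|rfl|rfl|rfl|rfl|rfl|rfl|rfl|rfl|rfl|rfl|rfl|rfl|rfl|rfl|rfl|rfl|rfl|rfl|rfl|rfl|rfl|rfl|rfl|rfl <;> decide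

lemma pvFlush_nil (toks : List String) : pvFlush (toks, []) = toks := rfl

-- on a non-whitespace character the intermediate step agrees with A's step
lemma stepI_eq_stepA {c : Char} (h : PySem.Chars.isspace c = false) (st : List String × List Char) :
    pvStepI st c = pvStepA st c := by
  unfold pvStepI pvStepA
  split_ifs with h1 h2
  · rfl
  · simp [h] at h2
  · rfl

-- on a whitespace character the intermediate step just flushes
lemma stepI_space {c : Char} (h : PySem.Chars.isspace c = true) (st : List String × List Char) :
    pvStepI st c = (pvFlush st, []) := by
  unfold pvStepI
  have hs : pvIsSym c = false := by
    cases hy : pvIsSym c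
    · rfl
    · rw [pvIsSym_not_space hy] at h; cases h
  cases st with
  | mk toks cur => by_cases hc : cur.isEmpty <;> simp_all [pvFlush, List.isEmpty_iff]

-- the word-processing function A applies to each whitespace-separated part
def pvWord (toks : List String) (w : List Char) : List String :=
  pvFlush (w.foldl pvStepA (toks, []))

-- split₀.go accumulator lemma
lemma pvGo_acc (cs : List Char) : ∀ cur acc, PySem.Chars.split₀.go cs cur acc
    = acc.reverse ++ PySem.Chars.split₀.go cs cur [] := by
  induction cs with
  | nil =>
    intro cur acc
    rw [pvGo_nil, pvGo_nil]
    by_cases h : cur.isEmpty <;> simp [h]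
  | cons c rest ih =>
    intro cur acc
    rw [pvGo_cons, pvGo_cons]
    by_cases hsp : PySem.Chars.isspace c
    · by_cases h : cur.isEmpty
      · simp only [hsp, h, if_true]
        exact ih [] acc
      · simp only [hsp, h, if_true]
        rw [ih [] (cur.reverse :: acc), ih [] [cur.reverse]]
        simp
    · simp only [hsp, Bool.false_eq_true, if_false]
      exact ih (c :: cur) acc

-- a run of non-whitespace characters is absorbed into split₀.go's current word
lemma pvGo_run (cs : List Char) : ∀ cur acc,
    PySem.Chars.split₀.go cs cur acc
      = PySem.Chars.split₀.go (cs.dropWhile (fun x => !PySem.Chars.isspace x))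
          ((cs.takeWhile (fun x => !PySem.Chars.isspace x)).reverse ++ cur) acc := by
  induction cs with
  | nil => intro cur acc; simp
  | cons c rest ih =>
    intro cur acc
    by_cases hsp : PySem.Chars.isspace c
    · simp [List.dropWhile, List.takeWhile, hsp]
    · rw [List.dropWhile_cons_of_pos (by simp [hsp]), List.takeWhile_cons_of_pos (by simp [hsp])]
      rw [pvGo_cons]
      simp only [hsp, Bool.false_eq_true, if_false]
      rw [ih (c :: cur) acc]
      simp

-- A's fold over split₀'s words equals the single intermediate pass
lemma a_eq_pass : ∀ (n : Nat) (cs : List Char), cs.length ≤ n → ∀ (toks : List String),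
    pvFlush (cs.foldl pvStepI (toks, [])) = (PySem.Chars.split₀ cs).foldl pvWord toks := by
  intro n
  induction n with
  | zero =>
    intro cs hlen toks
    have : cs = [] := List.eq_nil_of_length_eq_zero (Nat.le_zero.mp hlen)
    subst this
    simp [PySem.Chars.split₀, pvGo_nil, pvFlush]
  | succ n ih =>
    intro cs hlen toks
    cases cs with
    | nil => simp [PySem.Chars.split₀, pvGo_nil, pvFlush]
    | cons c rest =>
      by_cases hsp : PySem.Chars.isspace c
      · have h1 : (c :: rest).foldl pvStepI (toks, []) = rest.foldl pvStepI (toks, []) := by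
          simp [List.foldl_cons, stepI_space hsp, pvFlush_nil]
        have h2 : PySem.Chars.split₀ (c :: rest) = PySem.Chars.split₀ rest := by
          unfold PySem.Chars.split₀
          rw [pvGo_cons]
          simp [hsp]
        rw [h1, h2]
        exact ih rest (Nat.le_of_succ_le_succ hlen) toks
      · set P : Char → Bool := fun x => !PySem.Chars.isspace x with hP
        have hsplit : rest = rest.takeWhile P ++ rest.dropWhile P := (List.takeWhile_append_dropWhile).symm
        have hgo : PySem.Chars.split₀ (c :: rest)
            = PySem.Chars.split₀.go (rest.dropWhile P) ((rest.takeWhile P).reverse ++ [c]) [] := by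
          unfold PySem.Chars.split₀
          rw [pvGo_cons]
          simp only [hsp, Bool.false_eq_true, if_false]
          exact pvGo_run rest [c] []
        have hword : ∀ t : List String, (c :: rest.takeWhile P).foldl pvStepI (t, [])
            = (c :: rest.takeWhile P).foldl pvStepA (t, []) := by
          intro t
          apply PySem.List.foldl_congr_mem
          intro acc x hx
          rcases List.mem_cons.mp hx with rfl | hx'
          · exact stepI_eq_stepA (by simpa using hsp) acc
          · have := List.mem_takeWhile_imp hx'
            exact stepI_eq_stepA (by simpa [hP] using this) acc
        have hBsplit : (c :: rest).foldl pvStepI (toks, [])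
            = (rest.dropWhile P).foldl pvStepI ((c :: rest.takeWhile P).foldl pvStepI (toks, []) ) := by
          conv_lhs => rw [show (c :: rest) = (c :: rest.takeWhile P) ++ rest.dropWhile P by
            rw [List.cons_append, ← hsplit]]
          rw [List.foldl_append]
        cases hdw : rest.dropWhile P with
        | nil =>
          rw [hBsplit, hdw, List.foldl_nil, hword, hgo, hdw, pvGo_nil]
          have hne : ((rest.takeWhile P).reverse ++ [c]).isEmpty = false := by simp
          simp only [hne, Bool.false_eq_true, if_false]
          simp [pvWord]
        | cons d rest' =>
          have hd : PySem.Chars.isspace d = true := by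
            have h := List.head?_dropWhile_not P rest
            rw [hdw] at h
            simpa [hP] using h
          have hlen' : rest'.length ≤ n := by
            have h1 : (rest.dropWhile P).length ≤ rest.length := List.length_dropWhile_le _ _
            rw [hdw] at h1
            simp only [List.length_cons] at h1 hlen
            omega
          rw [hBsplit, hdw, hword toks]
          set st := (c :: rest.takeWhile P).foldl pvStepA (toks, []) with hst
          rw [List.foldl_cons, stepI_space hd st]
          rw [ih rest' hlen' (pvFlush st)]
          rw [hgo, hdw, pvGo_cons]
          have hne : ((rest.takeWhile P).reverse ++ [c]).isEmpty = false := by simp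
          simp only [hd, hne, Bool.false_eq_true, if_true, if_false]
          rw [pvGo_acc rest' [] [((rest.takeWhile P).reverse ++ [c]).reverse]]
          simp only [List.reverse_append, List.reverse_reverse,
            List.reverse_cons, List.reverse_nil, List.nil_append, List.singleton_append,
            List.foldl_cons]
          rfl

-- a run of word characters is accumulated unchanged by the intermediate pass
lemma run_fold : ∀ (w : List Char), (∀ x ∈ w, pvWordChar x = true) →
    ∀ (toks : List String) (cur : List Char), w.foldl pvStepI (toks, cur) = (toks, cur ++ w) := by
  intro w
  induction w with
  | nil => intro _ toks cur; simp
  | cons x xs ih =>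
    intro h toks cur
    have hx : pvWordChar x = true := h x (List.mem_cons_self)
    have hsym : pvIsSym x = false := by
      simp [pvWordChar] at hx; exact hx.1
    have hsp : PySem.Chars.isspace x = false := by
      simp [pvWordChar] at hx; exact hx.2
    rw [List.foldl_cons]
    have : pvStepI (toks, cur) x = (toks, cur ++ [x]) := by
      simp [pvStepI, hsym, hsp]
    rw [this, ih (fun y hy => h y (List.mem_cons_of_mem _ hy))]
    simp

-- the single intermediate pass equals B's regex scanner
lemma pass_eq_scan : ∀ (n : Nat) (cs : List Char), cs.length ≤ n → ∀ (toks : List String),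
    pvFlush (cs.foldl pvStepI (toks, [])) = toks ++ pvScan cs := by
  intro n
  induction n with
  | zero =>
    intro cs hlen toks
    have : cs = [] := List.eq_nil_of_length_eq_zero (Nat.le_zero.mp hlen)
    subst this
    simp [pvScan, pvFlush]
  | succ n ih =>
    intro cs hlen toks
    cases cs with
    | nil => simp [pvScan, pvFlush]
    | cons c rest =>
      by_cases hsym : pvIsSym c
      · rw [List.foldl_cons]
        have : pvStepI (toks, []) c = (toks ++ [String.ofList [c]], []) := by
          simp [pvStepI, hsym, pvFlush]
        rw [this, ih rest (Nat.le_of_succ_le_succ hlen)]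
        simp [pvScan, hsym]
      · by_cases hw : pvWordChar c
        · -- a maximal run starts at c
          have hrun : List.takeWhile pvWordChar (c :: rest) = c :: rest.takeWhile pvWordChar := by
            rw [List.takeWhile_cons_of_pos hw]
          have hdrop : List.dropWhile pvWordChar (c :: rest) = rest.dropWhile pvWordChar := by
            rw [List.dropWhile_cons_of_pos hw]
          have hall : ∀ x ∈ c :: rest.takeWhile pvWordChar, pvWordChar x = true := by
            intro x hx
            rcases List.mem_cons.mp hx with rfl | hx'
            · exact hw
            · exact List.mem_takeWhile_imp hx'
          have hBsplit : (c :: rest).foldl pvStepI (toks, [])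
              = (rest.dropWhile pvWordChar).foldl pvStepI (toks, c :: rest.takeWhile pvWordChar) := by
            conv_lhs => rw [show (c :: rest) = (c :: rest.takeWhile pvWordChar) ++ rest.dropWhile pvWordChar by
              rw [List.cons_append, List.takeWhile_append_dropWhile]]
            rw [List.foldl_append, run_fold _ hall]
            simp
          rw [hBsplit]
          have hscan : pvScan (c :: rest)
              = String.ofList (c :: rest.takeWhile pvWordChar) :: pvScan (rest.dropWhile pvWordChar) := by
            rw [pvScan]
            simp [hsym, hw, hrun, hdrop]
          cases hdw : rest.dropWhile pvWordChar with
          | nil =>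
            rw [List.foldl_nil, hscan, hdw]
            simp [pvFlush, pvScan]
          | cons d rest' =>
            have hdnw : pvWordChar d = false := by
              have h := List.head?_dropWhile_not pvWordChar rest
              rw [hdw] at h
              simpa using h
            have hlen' : rest'.length ≤ n := by
              have h1 : (rest.dropWhile pvWordChar).length ≤ rest.length := List.length_dropWhile_le _ _
              rw [hdw] at h1
              simp only [List.length_cons] at h1 hlen
              omega
            rw [List.foldl_cons]
            have hflush : pvFlush (toks, c :: rest.takeWhile pvWordChar)
                = toks ++ [String.ofList (c :: rest.takeWhile pvWordChar)] := by
              simp [pvFlush]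
            by_cases hds : pvIsSym d
            · have : pvStepI (toks, c :: rest.takeWhile pvWordChar) d
                  = (pvFlush (toks, c :: rest.takeWhile pvWordChar) ++ [String.ofList [d]], []) := by
                simp [pvStepI, hds]
              rw [this, ih rest' hlen', hflush, hscan, hdw]
              have : pvScan (d :: rest') = String.ofList [d] :: pvScan rest' := by
                rw [pvScan]; simp [hds]
              rw [this]
              simp
            · have hdsp : PySem.Chars.isspace d = true := by
                simp [pvWordChar, hds] at hdnw
                exact hdnw
              rw [stepI_space hdsp, ih rest' hlen', hflush, hscan, hdw]
              have : pvScan (d :: rest') = pvScan rest' := by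
                rw [pvScan]; simp [hds, pvWordChar, hdsp]
              rw [this]
              simp
        · -- whitespace: skipped by both
          have hsp : PySem.Chars.isspace c = true := by
            simp [pvWordChar, hsym] at hw
            exact hw
          rw [List.foldl_cons, stepI_space hsp, pvFlush_nil]
          rw [ih rest (Nat.le_of_succ_le_succ hlen)]
          have : pvScan (c :: rest) = pvScan rest := by
            rw [pvScan]; simp [hsym, hw]
          rw [this]

-- ===== VERDICT (by name: the statement is the Claim_ definition above) =====
theorem tokenize_java_code_spec : Claim_equal_tokenize_java_code := by
  intro code _
  unfold Spec_tokenize_java_code tokenize_java_code tokenize_java_code_alt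
  have ha := a_eq_pass code.toList.length code.toList (le_refl _) []
  have hb := pass_eq_scan code.toList.length code.toList (le_refl _) []
  rw [ha] at hb
  rw [← PySem.Str.split₀_map_toList, List.foldl_map] at hb
  simpa [pvWord] using hb
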